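-- pv_equiv track=rewrite | github.com/aminravanbakhsh/Design-Algorithm | DA_hw2/Q2.py | func
-- ===== SOURCE A (Python) =====
-- def func(A, k):
--     n = len(A)
--     dp = [[1 for j in range(k+1)] for i in range(n)]
--
--     for i in range(n):
--         for j in range(k+1):
--             for l in range(j+1):
--                 x = j - l
--                 y = i - l - 1
--                 if y >= 0:
--                     if A[i] >= A[y]:
--                         dp[i][j] = max(dp[i][j], dp[y][x] + 1)
--
--     ans = 0
--     for i in range(n):
--         for j in range(k+1):
--             if dp[i][j] > ans:
--                 ans = dp[i][j]
--
--     return ans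
-- ===== SOURCE B (Python) =====
-- def func(A, k):
--     from functools import lru_cache
--     n = len(A)
--
--     @lru_cache(maxsize=None)
--     def best(i, j):
--         b = 1
--         for l in range(j + 1):
--             y = i - l - 1
--             if y >= 0 and A[i] >= A[y]:
--                 b = max(b, 1 + best(y, j - l))
--         return b
--
--     ans = 0
--     for i in range(n):
--         for j in range(k + 1):
--             ans = max(ans, best(i, j))
--     return ans
-- ===== Notes on version B (the rewrite author's own statement) =====
-- stated objective: alternative
-- what changed: Replaced the bottom-up dp table filled in explicit i/j/l order by top-down memoized recursion (lru_cache) evaluating the same recurrence on demand.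
import Mathlib
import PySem

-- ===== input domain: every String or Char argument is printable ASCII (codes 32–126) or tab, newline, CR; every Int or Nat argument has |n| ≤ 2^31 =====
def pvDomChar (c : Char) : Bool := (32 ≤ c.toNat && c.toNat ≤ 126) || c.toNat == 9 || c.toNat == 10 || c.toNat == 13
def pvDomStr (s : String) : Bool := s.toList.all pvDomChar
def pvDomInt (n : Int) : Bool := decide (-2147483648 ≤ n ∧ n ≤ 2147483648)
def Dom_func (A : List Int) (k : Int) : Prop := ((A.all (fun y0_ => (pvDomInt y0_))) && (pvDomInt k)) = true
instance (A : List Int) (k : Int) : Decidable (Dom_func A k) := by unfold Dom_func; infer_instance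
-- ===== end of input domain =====

-- B replaces A's bottom-up dp table (explicit i/j/l fill order) with top-down recursion on the
-- same recurrence (memoized in Python; plain recursion in the port); objective: alternative.

-- ===== PORT A =====
-- innermost loop body: 'for l in range(j+1): x=j-l; y=i-l-1; if y>=0: if A[i]>=A[y]: dp[i][j]=max(...)'
def stepL (A : List Int) (i j : Nat) (dp : List (List Int)) (l : Nat) : List (List Int) :=
  let y : Int := (i : Int) - (l : Int) - 1
  if y ≥ 0 then
    if A.getD i 0 ≥ A.getD y.toNat 0 then
      dp.set i ((dp.getD i []).set j
        (max ((dp.getD i []).getD j 0) ((dp.getD y.toNat []).getD (j - l) 0 + 1)))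
    else dp
  else dp

def stepJ (A : List Int) (i : Nat) (dp : List (List Int)) (j : Nat) : List (List Int) :=
  (List.range (j + 1)).foldl (stepL A i j) dp

def stepI (A : List Int) (K : Nat) (dp : List (List Int)) (i : Nat) : List (List Int) :=
  (List.range K).foldl (stepJ A i) dp

def func (A : List Int) (k : Int) : Int :=
  let n := A.length
  let K := (k + 1).toNat          -- len(range(k+1))
  let dp := (List.range n).foldl (stepI A K) (List.replicate n (List.replicate K (1 : Int)))
  (List.range n).foldl (fun ans i =>
    (List.range K).foldl (fun ans j =>
      if (dp.getD i []).getD j 0 > ans then (dp.getD i []).getD j 0 else ans) ans) 0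

-- ===== PORT B =====
-- best(i, j) of Source B: the loop 'for l in range(j+1)' is the recursion on l; 'y >= 0' is 'l + 1 ≤ i'.
def bGo (A : List Int) (i j l : Nat) (acc : Int) : Int :=
  if l < j + 1 then
    bGo A i j (l + 1)
      (if _h : l + 1 ≤ i then
        (if A.getD i 0 ≥ A.getD (i - l - 1) 0 then max acc (1 + bGo A (i - l - 1) (j - l) 0 1)
         else acc)
       else acc)
  else acc
termination_by (i, j + 1 - l)
decreasing_by
  · exact Prod.Lex.left _ _ (by omega)
  · exact Prod.Lex.right _ (by omega)

def best (A : List Int) (i j : Nat) : Int := bGo A i j 0 1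

def func_alt (A : List Int) (k : Int) : Int :=
  (List.range A.length).foldl (fun ans i =>
    (List.range (k + 1).toNat).foldl (fun ans j => max ans (best A i j)) ans) 0

-- ===== PRECONDITION & SPEC =====
def Spec_func (A : List Int) (k : Int) (out : Int) : Prop := out = func_alt A k
instance (A : List Int) (k : Int) (out : Int) : Decidable (Spec_func A k out) := by unfold Spec_func; infer_instance

-- ===== CLAIM (what is proved, stated in full; the proofs are below) =====
def Claim_equal_func : Prop := ∀ (A : List Int) (k : Int), Dom_func A k → Spec_func A k (func A k)

-- ===== LEMMAS AND PROOFS =====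

-- one step of B's accumulator, as a plain ite (defeq to the dite inside bGo)
def bStep (A : List Int) (i j l : Nat) (acc : Int) : Int :=
  if l + 1 ≤ i then
    (if A.getD i 0 ≥ A.getD (i - l - 1) 0 then max acc (1 + best A (i - l - 1) (j - l)) else acc)
  else acc

theorem bGo_eq (A : List Int) (i j l : Nat) (acc : Int) :
    bGo A i j l acc = if l < j + 1 then bGo A i j (l + 1) (bStep A i j l acc) else acc := by
  rw [bGo]; simp only [bStep, best, dite_eq_ite]

-- expected value of cell (a, b) while row ib is being filled: rows below ib and the first jb
-- cells of row ib are final (= best), cell (ib, jb) holds the running accumulator, the rest is 1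
def fC (A : List Int) (ib jb : Nat) (acc : Int) (a b : Nat) : Int :=
  if a < ib ∨ (a = ib ∧ b < jb) then best A a b else if a = ib ∧ b = jb then acc else 1

def cellOk (A : List Int) (K : Nat) (f : Nat → Nat → Int) (dp : List (List Int)) : Prop :=
  dp.length = A.length ∧ ∀ a, a < A.length →
    ((dp.getD a []).length = K ∧ ∀ b, b < K → (dp.getD a []).getD b 0 = f a b)

theorem cellOk_congr {A : List Int} {K : Nat} {f g : Nat → Nat → Int} {dp : List (List Int)}
    (h : ∀ a b, a < A.length → b < K → f a b = g a b) (hc : cellOk A K f dp) :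
    cellOk A K g dp := by
  refine ⟨hc.1, fun a ha => ⟨(hc.2 a ha).1, fun b hb => ?_⟩⟩
  rw [(hc.2 a ha).2 b hb, h a b ha hb]

theorem getD_set {α : Type} [Inhabited α] (l : List α) (i j : Nat) (x d : α) :
    (l.set i x).getD j d = if i = j ∧ i < l.length then x else l.getD j d := by
  simp only [List.getD, List.getElem?_set]
  split_ifs with h1 h2 h3 h3 <;> simp_all <;> omega

theorem stepL_inv {A : List Int} {K i j l : Nat} {acc : Int} {dp : List (List Int)}
    (hi : i < A.length) (hj : j < K) (hl : l ≤ j) (hc : cellOk A K (fC A i j acc) dp) :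
    cellOk A K (fC A i j (bStep A i j l acc)) (stepL A i j dp l) := by
  unfold stepL bStep
  by_cases hy : ((i : Int) - (l : Int) - 1) ≥ 0
  · have hli : l + 1 ≤ i := by omega
    have hyn : ((i : Int) - (l : Int) - 1).toNat = i - l - 1 := by omega
    simp only [if_pos hy, hyn, if_pos hli]
    have hy1 : i - l - 1 < A.length := by omega
    have hrowi := hc.2 i hi
    have hrowy := hc.2 (i - l - 1) hy1
    have hvy : (dp.getD (i - l - 1) []).getD (j - l) 0 = best A (i - l - 1) (j - l) := by
      rw [hrowy.2 (j - l) (by omega)]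
      have hcnd : i - l - 1 < i ∨ (i - l - 1 = i ∧ j - l < j) := Or.inl (by omega)
      simp only [fC, if_pos hcnd]
    have hvi : (dp.getD i []).getD j 0 = acc := by
      rw [hrowi.2 j hj]
      simp [fC]
    by_cases hcmp : A.getD i 0 ≥ A.getD (i - l - 1) 0
    · simp only [if_pos hcmp, hvy, hvi]
      have hacc : max acc (best A (i - l - 1) (j - l) + 1)
          = max acc (1 + best A (i - l - 1) (j - l)) := by omega
      rw [hacc]
      set acc' := max acc (1 + best A (i - l - 1) (j - l)) with hacc'
      refine ⟨by simpa using hc.1, fun a ha => ?_⟩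
      rw [getD_set dp i a ((dp.getD i []).set j acc') []]
      by_cases hai : i = a
      · have hcnd : i = a ∧ i < dp.length := ⟨hai, by rw [hc.1]; omega⟩
        rw [if_pos hcnd]
        subst hai
        refine ⟨by simpa using hrowi.1, fun b hb => ?_⟩
        rw [getD_set ((dp.getD i [])) j b acc' 0]
        by_cases hbj : j = b
        · have hcnd2 : j = b ∧ j < (dp.getD i []).length := ⟨hbj, by rw [hrowi.1]; omega⟩
          rw [if_pos hcnd2]
          subst hbj
          simp [fC]
        · rw [if_neg (fun h => hbj h.1), hrowi.2 b hb]
          simp only [fC]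
          split_ifs <;> omega
      · rw [if_neg (fun h => hai h.1)]
        have hrowa := hc.2 a ha
        refine ⟨hrowa.1, fun b hb => ?_⟩
        rw [hrowa.2 b hb]
        simp only [fC]
        split_ifs <;> omega
    · simpa only [if_neg hcmp] using hc
  · have hli : ¬ (l + 1 ≤ i) := by omega
    simpa only [if_neg hy, if_neg hli] using hc

theorem innerLoop {A : List Int} {K i j : Nat} :
    ∀ (m l : Nat) (acc : Int) (dp : List (List Int)), i < A.length → j < K → l + m = j + 1 →
    cellOk A K (fC A i j acc) dp →
    cellOk A K (fC A i j (bGo A i j l acc)) ((List.range' l m).foldl (stepL A i j) dp) := by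
  intro m
  induction m with
  | zero =>
    intro l acc dp hi hj hm hc
    rw [bGo_eq, if_neg (by omega)]
    simpa using hc
  | succ m ih =>
    intro l acc dp hi hj hm hc
    rw [List.range'_succ, List.foldl_cons, bGo_eq, if_pos (by omega)]
    exact ih (l + 1) (bStep A i j l acc) (stepL A i j dp l) hi hj (by omega)
      (stepL_inv hi hj (by omega) hc)

theorem midLoop {A : List Int} {K i : Nat} :
    ∀ (m j : Nat) (dp : List (List Int)), i < A.length → j + m = K →
    cellOk A K (fC A i j 1) dp →
    cellOk A K (fC A (i + 1) 0 1) ((List.range' j m).foldl (stepJ A i) dp) := by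
  intro m
  induction m with
  | zero =>
    intro j dp hi hm hc
    simp only [List.range', List.foldl_nil]
    refine cellOk_congr (fun a b ha hb => ?_) hc
    simp only [fC]
    split_ifs <;> omega
  | succ m ih =>
    intro j dp hi hm hc
    rw [List.range'_succ, List.foldl_cons]
    have hstep : cellOk A K (fC A i (j + 1) 1) (stepJ A i dp j) := by
      have h1 : cellOk A K (fC A i j (best A i j))
          ((List.range' 0 (j + 1)).foldl (stepL A i j) dp) :=
        innerLoop (j + 1) 0 1 dp hi (by omega) (by omega) hc
      unfold stepJ
      rw [List.range_eq_range']
      refine cellOk_congr (fun a b ha hb => ?_) h1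
      by_cases hab : a = i ∧ b = j
      · obtain ⟨hab1, hab2⟩ := hab
        subst hab1; subst hab2
        simp [fC]
      · simp only [fC]
        split_ifs <;> omega
    exact ih (j + 1) (stepJ A i dp j) hi (by omega) hstep

theorem outerLoop {A : List Int} {K : Nat} :
    ∀ (m i : Nat) (dp : List (List Int)), i + m = A.length →
    cellOk A K (fC A i 0 1) dp →
    cellOk A K (fun a b => best A a b) ((List.range' i m).foldl (stepI A K) dp) := by
  intro m
  induction m with
  | zero =>
    intro i dp hm hc
    simp only [List.range', List.foldl_nil]
    refine cellOk_congr (fun a b ha hb => ?_) hc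
    simp only [fC]
    split_ifs <;> omega
  | succ m ih =>
    intro i dp hm hc
    rw [List.range'_succ, List.foldl_cons]
    have hstep : cellOk A K (fC A (i + 1) 0 1) (stepI A K dp i) := by
      unfold stepI
      rw [List.range_eq_range']
      exact midLoop K 0 dp (by omega) (by omega) hc
    exact ih (i + 1) (stepI A K dp i) (by omega) hstep

theorem init_cellOk (A : List Int) (K : Nat) :
    cellOk A K (fC A 0 0 1) (List.replicate A.length (List.replicate K (1 : Int))) := by
  refine ⟨by simp, fun a ha => ?_⟩
  have hrow : (List.replicate A.length (List.replicate K (1 : Int))).getD a []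
      = List.replicate K (1 : Int) := by
    simp [List.getD, ha]
  rw [hrow]
  refine ⟨by simp, fun b hb => ?_⟩
  have : (List.replicate K (1 : Int)).getD b 0 = 1 := by
    simp [List.getD, hb]
  rw [this]
  simp only [fC]
  split_ifs <;> omega

theorem ite_gt_eq_max (a v : Int) : (if v > a then v else a) = max a v := by
  rw [max_def]; split_ifs <;> omega

theorem func_eq_alt (A : List Int) (k : Int) : func A k = func_alt A k := by
  unfold func func_alt
  have hdp : cellOk A ((k + 1).toNat) (fun a b => best A a b)
      ((List.range A.length).foldl (stepI A ((k + 1).toNat))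
        (List.replicate A.length (List.replicate ((k + 1).toNat) (1 : Int)))) := by
    rw [List.range_eq_range']
    exact outerLoop A.length 0 _ (by omega) (init_cellOk A _)
  set dp := (List.range A.length).foldl (stepI A ((k + 1).toNat))
      (List.replicate A.length (List.replicate ((k + 1).toNat) (1 : Int))) with hdpdef
  apply PySem.List.foldl_congr_mem
  intro ans i hi
  have hi' : i < A.length := List.mem_range.mp hi
  apply PySem.List.foldl_congr_mem
  intro ans j hj
  have hj' : j < (k + 1).toNat := List.mem_range.mp hj
  rw [((hdp.2 i hi').2 j hj')]
  exact ite_gt_eq_max ans (best A i j)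

-- ===== VERDICT (by name: the statement is the Claim_ definition above) =====
theorem func_spec : Claim_equal_func := by
  intro A k _
  unfold Spec_func
  exact func_eq_alt A k
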